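-- pv_equiv track=rewrite | github.com/nikuframedia-svg/Moldit- | backend/parser/isop_reader.py | extract_stock_and_demand
-- ===== SOURCE A (Python) =====
-- def extract_stock_and_demand(np_values: list[int]) -> tuple[int, list[int]]:
--     """Extract stock and demand from NP values.
--
--     Stock = last positive value before first negative.
--     Demand = abs(negative values), 0 elsewhere.
--     """
--     stk = 0
--     demand: list[int] = []
--     found_negative = False
--
--     for val in np_values:
--         if val > 0 and not found_negative:
--             stk = val
--             demand.append(0)
--         elif val < 0:
--             found_negative = True
--             demand.append(abs(val))
--         else:
--             demand.append(0)
--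
--     return stk, demand
-- ===== SOURCE B (Python) =====
-- def extract_stock_and_demand(np_values: list[int]) -> tuple[int, list[int]]:
--     """Extract stock and demand from NP values (two independent passes)."""
--     demand = [-v if v < 0 else 0 for v in np_values]
--     first_neg = next((i for i, v in enumerate(np_values) if v < 0), len(np_values))
--     positives = [v for v in np_values[:first_neg] if v > 0]
--     stk = positives[-1] if positives else 0
--     return stk, demand
-- ===== Notes on version B (the rewrite author's own statement) =====
-- stated objective: simpler
-- what changed: Replaces the single flag-driven loop carrying (stk, found_negative) state by two independent passes: a direct comprehension for demand, and a first-negative index search whose prefix's last positive gives the stock.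
import Mathlib
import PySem

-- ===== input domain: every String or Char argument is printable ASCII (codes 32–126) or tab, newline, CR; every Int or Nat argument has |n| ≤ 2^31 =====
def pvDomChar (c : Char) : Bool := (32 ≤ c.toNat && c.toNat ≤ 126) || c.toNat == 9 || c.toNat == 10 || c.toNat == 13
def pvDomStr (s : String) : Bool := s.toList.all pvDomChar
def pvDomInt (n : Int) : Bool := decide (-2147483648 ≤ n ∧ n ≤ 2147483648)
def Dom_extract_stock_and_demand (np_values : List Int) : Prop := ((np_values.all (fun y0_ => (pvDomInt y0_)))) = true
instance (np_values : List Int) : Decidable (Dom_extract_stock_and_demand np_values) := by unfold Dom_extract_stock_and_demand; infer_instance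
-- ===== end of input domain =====

-- B replaces A's single flag-driven stateful loop by two independent passes (demand comprehension + first-negative prefix scan); objective: simpler.

-- ===== PORT A =====
-- the for-loop with state (stk, demand, found_negative)
def pvLoopA : List Int → Int → List Int → Bool → Int × List Int
  | [], stk, demand, _ => (stk, demand)
  | v :: rest, stk, demand, found =>
    if v > 0 ∧ found = false then pvLoopA rest v (demand ++ [0]) found
    else if v < 0 then pvLoopA rest stk (demand ++ [|v|]) true
    else pvLoopA rest stk (demand ++ [0]) found

def extract_stock_and_demand (np_values : List Int) : Int × List Int :=
  pvLoopA np_values 0 [] false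

-- ===== PORT B =====
def extract_stock_and_demand_alt (np_values : List Int) : Int × List Int :=
  let demand := np_values.map (fun v => if v < 0 then -v else 0)
  let first_neg := (np_values.findIdx? (fun v => decide (v < 0))).getD np_values.length
  let positives := (np_values.take first_neg).filter (fun v => decide (v > 0))
  let stk := positives.getLast?.getD 0
  (stk, demand)

-- ===== PRECONDITION & SPEC =====
def Spec_extract_stock_and_demand (np_values : List Int) (out : Int × List Int) : Prop := out = extract_stock_and_demand_alt np_values
instance (np_values : List Int) (out : Int × List Int) : Decidable (Spec_extract_stock_and_demand np_values out) := by unfold Spec_extract_stock_and_demand; infer_instance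

-- ===== CLAIM (what is proved, stated in full; the proofs are below) =====
def Claim_equal_extract_stock_and_demand : Prop := ∀ (np_values : List Int), Dom_extract_stock_and_demand np_values → Spec_extract_stock_and_demand np_values (extract_stock_and_demand np_values)

-- ===== LEMMAS AND PROOFS =====

theorem pvLoopA_true (xs : List Int) : ∀ (stk : Int) (d : List Int),
    pvLoopA xs stk d true = (stk, d ++ xs.map (fun v => if v < 0 then -v else 0)) := by
  induction xs with
  | nil => simp [pvLoopA]
  | cons v rest ih =>
    intro stk d
    by_cases hv : v < 0
    · simp [pvLoopA, hv, ih, abs_of_neg hv]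
    · simp [pvLoopA, hv, ih]

theorem pvLoopA_false (xs : List Int) : ∀ (stk : Int) (d : List Int),
    pvLoopA xs stk d false =
      ((((xs.takeWhile (fun v => decide (0 ≤ v))).filter (fun v => decide (v > 0))).getLast?).getD stk,
       d ++ xs.map (fun v => if v < 0 then -v else 0)) := by
  induction xs with
  | nil => simp [pvLoopA]
  | cons v rest ih =>
    intro stk d
    by_cases hv : v < 0
    · simp [pvLoopA, hv, pvLoopA_true, not_le.mpr hv, abs_of_neg hv,
        show ¬(0 < v) from by omega]
    · have h0 : (0:Int) ≤ v := not_lt.mp hv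
      by_cases hp : v > 0
      · simp [pvLoopA, hv, ih, h0]
        simp [hp]
      · have hz : v = 0 := by omega
        simp [pvLoopA, hp, hv, ih, h0]

theorem take_findIdx (xs : List Int) :
    xs.take ((xs.findIdx? (fun v => decide (v < 0))).getD xs.length)
      = xs.takeWhile (fun v => decide (0 ≤ v)) := by
  induction xs with
  | nil => simp
  | cons v rest ih =>
    by_cases hv : v < 0
    · simp [List.findIdx?_cons, hv, not_le.mpr hv]
    · have h0 : (0:Int) ≤ v := not_lt.mp hv
      simp only [List.findIdx?_cons, decide_eq_true_eq]
      rw [if_neg hv]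
      simp only [List.takeWhile_cons, decide_eq_true_eq, if_pos h0]
      cases h : rest.findIdx? (fun v => decide (v < 0)) with
      | none => simpa [h, List.length_cons] using ih
      | some i => simpa [h] using ih

-- ===== VERDICT (by name: the statement is the Claim_ definition above) =====
theorem extract_stock_and_demand_spec : Claim_equal_extract_stock_and_demand := by
  intro xs _
  unfold Spec_extract_stock_and_demand extract_stock_and_demand
  rw [pvLoopA_false]
  simp [extract_stock_and_demand_alt, take_findIdx]
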